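-- pv_equiv track=rewrite | github.com/KostyaLazanchuk/Security | Lab1/PythonCode/main.py | transpose_chunks_by_keylength
-- ===== SOURCE A (Python) =====
-- def transpose_chunks_by_keylength(keylength, ciphertext):
--
--   chunks = dict.fromkeys(range(keylength))
--
--   i = 0
--   for octet in ciphertext:
--
--     if (i == keylength): i = 0
--     if (chunks[i] == None): chunks[i] = []
--     chunks[i].append(octet)
--
--     i += 1
--
--   return chunks
-- ===== SOURCE B (Python) =====
-- def transpose_chunks_by_keylength(keylength, ciphertext):
--     if keylength <= 0:
--         raise ValueError("keylength must be positive")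
--     n = len(ciphertext)
--     return {j: [ciphertext[m] for m in range(j, n, keylength)] or None
--             for j in range(keylength)}
-- ===== Notes on version B (the rewrite author's own statement) =====
-- stated objective: alternative
-- what changed: B builds the result column by column (one strided index-comprehension per key, as a dict comprehension) instead of A's single byte-by-byte routing scan with a mutable counter and lazily-initialised buckets; B also validates that keylength is positive.
-- outside the precondition, e.g. on transpose_chunks_by_keylength(0, []): A returns {}, B raises ValueError; on transpose_chunks_by_keylength(-2, []): A returns {}, B raises ValueError
import Mathlib
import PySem

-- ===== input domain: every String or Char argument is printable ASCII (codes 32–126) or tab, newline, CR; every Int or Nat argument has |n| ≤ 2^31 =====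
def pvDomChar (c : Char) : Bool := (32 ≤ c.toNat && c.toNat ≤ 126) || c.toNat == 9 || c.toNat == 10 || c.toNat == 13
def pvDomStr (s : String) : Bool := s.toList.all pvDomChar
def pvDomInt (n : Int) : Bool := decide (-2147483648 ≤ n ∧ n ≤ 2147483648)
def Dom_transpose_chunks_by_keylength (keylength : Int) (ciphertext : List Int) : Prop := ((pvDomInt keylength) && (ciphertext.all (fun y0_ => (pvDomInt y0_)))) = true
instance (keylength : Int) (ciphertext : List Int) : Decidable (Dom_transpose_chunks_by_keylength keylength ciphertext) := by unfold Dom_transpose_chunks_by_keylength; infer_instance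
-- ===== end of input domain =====

-- B builds the dict column by column (one strided index pass per key) instead of A's
-- byte-by-byte routing scan with a counter; alternative decomposition, same cost.

-- ===== PORT A =====
-- dict value read chunks[i] (first match in the association list); the `.getD none`
-- fallback corresponds to Python's KeyError, reachable only outside Pre_.
def pvGetV (d : List (Int × Option (List Int))) (i : Int) : Option (List Int) :=
  (d.lookup i).getD none

-- dict value write chunks[i] = v: overwrite in place; a missing key (KeyError in
-- Python, only outside Pre_) is a no-op.
def pvSetV (d : List (Int × Option (List Int))) (i : Int) (v : Option (List Int)) :
    List (Int × Option (List Int)) :=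
  match d with
  | [] => []
  | (a, b) :: t => if a = i then (a, v) :: t else (a, b) :: pvSetV t i v

-- the 'for octet in ciphertext' loop of A, one step per element
def pvLoop (keylength : Int) (d : List (Int × Option (List Int))) (i : Int)
    (l : List Int) : List (Int × Option (List Int)) :=
  match l with
  | [] => d
  | x :: xs =>
    let i' := if i = keylength then 0 else i
    let d1 := if pvGetV d i' = none then pvSetV d i' (some []) else d
    let d2 := pvSetV d1 i' (some ((pvGetV d1 i').getD [] ++ [x]))  -- chunks[i].append(octet)
    pvLoop keylength d2 (i' + 1) xs

def transpose_chunks_by_keylength (keylength : Int) (ciphertext : List Int) :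
    List (Int × Option (List Int)) :=
  let chunks := (PySem.List.pyRange 0 keylength 1).map (fun j => (j, (none : Option (List Int))))  -- dict.fromkeys(range(keylength))
  pvLoop keylength chunks 0 ciphertext

-- ===== PORT B =====
-- Source B's initial 'raise ValueError' fires only for keylength ≤ 0, which is outside
-- Pre_; nothing is claimed there, so the port carries no value for it.
def transpose_chunks_by_keylength_alt (keylength : Int) (ciphertext : List Int) :
    List (Int × Option (List Int)) :=
  let n : Int := ciphertext.length
  (PySem.List.pyRange 0 keylength 1).map (fun j =>
    -- ciphertext[m] for m in range(j, n, keylength): 0 ≤ m < n here, so the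
    -- pyGetD default is never used
    let col := (PySem.List.pyRange j n keylength).map (fun m => PySem.List.pyGetD ciphertext m 0)
    (j, if col = [] then none else some col))  -- 'col or None'

-- ===== PRECONDITION & SPEC =====
-- Pre_ admits exactly the positive keylengths: for keylength ≤ 0 A raises KeyError
-- whenever ciphertext is nonempty, and on the remaining empty-ciphertext corner B's
-- validation raises ValueError (its natural behaviour), so those inputs are excluded.
def Pre_transpose_chunks_by_keylength (keylength : Int) (ciphertext : List Int) : Prop :=
  1 ≤ keylength
instance (keylength : Int) (ciphertext : List Int) : Decidable (Pre_transpose_chunks_by_keylength keylength ciphertext) := by unfold Pre_transpose_chunks_by_keylength; infer_instance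

def pvWitness_transpose_chunks_by_keylength : Int × List Int := (3, [10, 20, 30, 40, 50])

def Spec_transpose_chunks_by_keylength (keylength : Int) (ciphertext : List Int) (out : List (Int × Option (List Int))) : Prop := out = transpose_chunks_by_keylength_alt keylength ciphertext
instance (keylength : Int) (ciphertext : List Int) (out : List (Int × Option (List Int))) : Decidable (Spec_transpose_chunks_by_keylength keylength ciphertext out) := by unfold Spec_transpose_chunks_by_keylength; infer_instance

-- ===== CLAIM (what is proved, stated in full; the proofs are below) =====
def Claim_equal_transpose_chunks_by_keylength : Prop := ∀ (keylength : Int) (ciphertext : List Int), Dom_transpose_chunks_by_keylength keylength ciphertext → Pre_transpose_chunks_by_keylength keylength ciphertext → Spec_transpose_chunks_by_keylength keylength ciphertext (transpose_chunks_by_keylength keylength ciphertext)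

-- ===== LEMMAS AND PROOFS =====

-- the canonical shape of A's dict: keys a, a+1, …, b-1 with values given by f
def canonFrom (a b : Int) (f : Int → Option (List Int)) : List (Int × Option (List Int)) :=
  (PySem.List.pyRange a b 1).map (fun j => (j, f j))

def updF (f : Int → Option (List Int)) (i : Int) (v : Option (List Int)) :
    Int → Option (List Int) :=
  fun j => if j = i then v else f j

-- A's loop, abstracted to the value function of the dict
def engine (k : Int) (f : Int → Option (List Int)) (i : Int) :
    List Int → ((Int → Option (List Int)) × Int)
  | [] => (f, i)
  | x :: xs =>
    let i' := if i = k then 0 else i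
    engine k (updF f i' (some ((f i').getD [] ++ [x]))) (i' + 1) xs

-- the elements routed to bucket j when the counter starts at i
def routed (k i : Int) (l : List Int) (j : Int) : List Int :=
  match l with
  | [] => []
  | x :: xs =>
    let i' := if i = k then 0 else i
    (if j = i' then [x] else []) ++ routed k (i' + 1) xs j

-- B's column starting at index a with stride k
def colFrom (k a : Int) (l : List Int) : List Int :=
  (PySem.List.pyRange a (l.length : Int) k).map (fun m => PySem.List.pyGetD l m 0)

theorem canonFrom_congr (a b : Int) (f g : Int → Option (List Int))
    (h : ∀ j, a ≤ j → j < b → f j = g j) : canonFrom a b f = canonFrom a b g := by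
  unfold canonFrom
  apply List.map_congr_left
  intro j hj
  rw [PySem.List.mem_pyRange_one] at hj
  exact congrArg _ (h j hj.1 hj.2)

theorem pvGetV_canonFrom (a b i : Int) (f : Int → Option (List Int))
    (ha : a ≤ i) (hb : i < b) : pvGetV (canonFrom a b f) i = f i := by
  have hn : (b - a).toNat ≠ 0 := by omega
  induction hm : (b - a).toNat generalizing a with
  | zero => omega
  | succ m ih =>
    rw [canonFrom, PySem.List.pyRange_one_cons (by omega), List.map_cons]
    by_cases hai : a = i
    · subst hai; simp [pvGetV, List.lookup]
    · have hia : (i == a) = false := beq_eq_false_iff_ne.mpr (fun h => hai h.symm)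
      simp only [pvGetV, List.lookup, hia]
      by_cases hm1 : m = 0
      · omega
      · exact ih (a + 1) (by omega) (by omega) (by omega)

theorem pvSetV_canonFrom (a b i : Int) (f : Int → Option (List Int)) (v : Option (List Int))
    (ha : a ≤ i) (hb : i < b) :
    pvSetV (canonFrom a b f) i v = canonFrom a b (updF f i v) := by
  have hn : (b - a).toNat ≠ 0 := by omega
  induction hm : (b - a).toNat generalizing a with
  | zero => omega
  | succ m ih =>
    rw [canonFrom, PySem.List.pyRange_one_cons (by omega), List.map_cons]
    rw [show canonFrom a b (updF f i v) =
          (a, updF f i v a) :: canonFrom (a+1) b (updF f i v) by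
        rw [canonFrom, PySem.List.pyRange_one_cons (by omega), List.map_cons]; rfl]
    by_cases hai : a = i
    · subst hai
      simp only [pvSetV]
      rw [if_pos trivial, show updF f a v a = v by simp [updF]]
      congr 1
      exact (canonFrom_congr _ _ _ _ (fun j h1 h2 => by
        simp only [updF]; rw [if_neg (by omega)])).symm
    · simp only [pvSetV]
      rw [if_neg hai, show updF f i v a = f a by simp only [updF]; rw [if_neg (by omega)]]
      congr 1
      by_cases hm1 : m = 0
      · omega
      · exact ih (a + 1) (by omega) (by omega) (by omega)

-- E1: A's loop on a canonical dict is the engine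
theorem pvLoop_canonFrom (k : Int) (hk : 1 ≤ k) (l : List Int) :
    ∀ (f : Int → Option (List Int)) (i : Int), 0 ≤ i → i ≤ k →
    pvLoop k (canonFrom 0 k f) i l = canonFrom 0 k (engine k f i l).1 := by
  induction l with
  | nil => intro f i _ _; rfl
  | cons x xs ih =>
    intro f i h0 h1
    have hi' : 0 ≤ (if i = k then 0 else i) ∧ (if i = k then 0 else i) < k := by
      split <;> omega
    simp only [pvLoop, engine]
    set i' := if i = k then 0 else i with hi'def
    rw [pvGetV_canonFrom 0 k i' f hi'.1 hi'.2]
    by_cases hf : f i' = none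
    · have hfe : updF (updF f i' (some [])) i'
          (some ((updF f i' (some []) i').getD [] ++ [x])) =
          updF f i' (some ((f i').getD [] ++ [x])) := by
        funext j
        simp only [updF]
        by_cases hj : j = i' <;> simp [hj, hf]
      rw [if_pos hf, pvSetV_canonFrom 0 k i' f (some []) hi'.1 hi'.2,
        pvGetV_canonFrom 0 k i' _ hi'.1 hi'.2,
        pvSetV_canonFrom 0 k i' _ _ hi'.1 hi'.2, hfe,
        ih _ (i' + 1) (by omega) (by omega)]
    · rw [if_neg hf, pvGetV_canonFrom 0 k i' f hi'.1 hi'.2,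
        pvSetV_canonFrom 0 k i' _ _ hi'.1 hi'.2,
        ih _ (i' + 1) (by omega) (by omega)]

-- E4a: the engine's bucket j is the start value extended by the routed elements
theorem engine_routed (k : Int) (l : List Int) :
    ∀ (f : Int → Option (List Int)) (i j : Int),
    (engine k f i l).1 j =
      if f j = none ∧ routed k i l j = [] then none
      else some ((f j).getD [] ++ routed k i l j) := by
  induction l with
  | nil =>
    intro f i j
    cases hfj : f j <;> simp [engine, routed, hfj]
  | cons x xs ih =>
    intro f i j
    simp only [engine, routed]
    set i' := if i = k then 0 else i
    rw [ih]
    by_cases hj : j = i'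
    · cases hfj : f i' <;> simp [updF, hj, hfj]
    · simp [updF, hj]

-- shift: range(a+1, b+1, k) = [m+1 for m in range(a, b, k)]
theorem pyRange_pos_shift (a b k : Int) (hk : 0 < k) :
    PySem.List.pyRange (a + 1) (b + 1) k = (PySem.List.pyRange a b k).map (· + 1) := by
  rw [PySem.List.pyRange_of_pos _ _ hk, PySem.List.pyRange_of_pos _ _ hk, List.map_map]
  by_cases hab : a < b
  · rw [if_pos (show a + 1 < b + 1 by omega), if_pos hab,
      show (b + 1 - (a + 1) + k - 1) = (b - a + k - 1) by ring]
    apply List.map_congr_left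
    intro t _
    simp only [Function.comp]
    ring
  · rw [if_neg (by omega), if_neg hab]
    simp

-- cons: range(a, b, k) = a :: range(a+k, b, k) for a < b, 0 < k
theorem pyRange_pos_cons (a b k : Int) (hk : 0 < k) (hab : a < b) :
    PySem.List.pyRange a b k = a :: PySem.List.pyRange (a + k) b k := by
  rw [PySem.List.pyRange_of_pos _ _ hk, PySem.List.pyRange_of_pos _ _ hk]
  have hcount : (b - a + k - 1) / k = (b - (a + k) + k - 1) / k + 1 := by
    have : b - a + k - 1 = (b - (a + k) + k - 1) + 1 * k := by ring
    rw [this, Int.add_mul_ediv_right _ _ (by omega)]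
  by_cases h2 : a + k < b
  · rw [if_pos hab, if_pos h2, hcount]
    have hnn : 0 ≤ (b - (a + k) + k - 1) / k := Int.ediv_nonneg (by omega) (by omega)
    rw [show ((b - (a + k) + k - 1) / k + 1).toNat = ((b - (a + k) + k - 1) / k).toNat + 1 by omega]
    rw [List.range_succ_eq_map, List.map_cons, List.map_map]
    congr 1
    · simp
    · apply List.map_congr_left; intro t _; simp only [Function.comp]; push_cast; ring
  · rw [if_pos hab, if_neg h2]
    have hz : (b - (a + k) + k - 1) / k = 0 := by
      apply Int.ediv_eq_zero_of_lt <;> omega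
    rw [hcount, hz]
    simp

-- empty column: range(a, b, k) = [] when b ≤ a, 0 < k
theorem pyRange_pos_nil (a b k : Int) (hk : 0 < k) (hab : b ≤ a) :
    PySem.List.pyRange a b k = [] := by
  rw [PySem.List.pyRange_of_pos _ _ hk, if_neg (by omega)]
  simp

theorem pyGetD_cons_shift (x : Int) (xs : List Int) (m : Int) (hm : 0 ≤ m) :
    PySem.List.pyGetD (x :: xs) (m + 1) 0 = PySem.List.pyGetD xs m 0 := by
  obtain ⟨n, rfl⟩ := Int.eq_ofNat_of_zero_le hm
  rw [show ((n : Int) + 1) = ((n + 1 : Nat) : Int) by push_cast; ring]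
  rw [PySem.List.pyGetD_natCast, PySem.List.pyGetD_natCast]
  rfl

-- rotation: the column of a cons list
theorem colFrom_cons (k a : Int) (x : Int) (xs : List Int) (hk : 1 ≤ k)
    (h0 : 0 ≤ a) (h1 : a < k) :
    colFrom k a (x :: xs) =
      if a = 0 then x :: colFrom k (k - 1) xs else colFrom k (a - 1) xs := by
  unfold colFrom
  have hshift : ∀ (c : Int), 0 ≤ c →
      (PySem.List.pyRange (c + 1) ((xs.length : Int) + 1) k).map
        (fun m => PySem.List.pyGetD (x :: xs) m 0) =
      (PySem.List.pyRange c (xs.length : Int) k).map (fun m => PySem.List.pyGetD xs m 0) := by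
    intro c hc
    rw [pyRange_pos_shift c (xs.length : Int) k (by omega), List.map_map]
    apply List.map_congr_left
    intro m hm
    have := (PySem.List.mem_pyRange_iff_of_pos (by omega : (0:Int) < k) m).1 hm
    simp only [Function.comp]
    exact pyGetD_cons_shift x xs m (by omega)
  have hlen : ((x :: xs).length : Int) = (xs.length : Int) + 1 := by
    simp
  by_cases ha : a = 0
  · subst ha
    rw [if_pos rfl]
    rw [hlen, pyRange_pos_cons 0 ((xs.length : Int) + 1) k (by omega) (by omega), List.map_cons]
    congr 1
    · simp [PySem.List.pyGetD_zero_cons]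
    · rw [show (0 + k) = (k - 1) + 1 by ring]
      exact hshift (k - 1) (by omega)
  · rw [if_neg ha]
    obtain ⟨c, hc, rfl⟩ : ∃ c, 0 ≤ c ∧ a = c + 1 := ⟨a - 1, by omega, by ring⟩
    rw [hlen, show c + 1 - 1 = c by ring]
    exact hshift c hc

-- the distance from counter i to bucket j, going forward modulo k (closed form)
def distTo (k i j : Int) : Int := if i ≤ j then j - i else j - i + k

-- G: routed elements are exactly B's strided column
theorem routed_eq_colFrom (k : Int) (hk : 1 ≤ k) (l : List Int) :
    ∀ (i j : Int), 0 ≤ i → i ≤ k → 0 ≤ j → j < k →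
    routed k i l j = colFrom k (distTo k (if i = k then 0 else i) j) l := by
  induction l with
  | nil =>
    intro i j h0 h1 h2 h3
    simp only [routed]
    set i' := if i = k then 0 else i with hi'def
    have hi' : 0 ≤ i' ∧ i' < k := by rw [hi'def]; split <;> omega
    have hd : 0 ≤ distTo k i' j := by unfold distTo; split <;> omega
    rw [colFrom, show ((List.nil : List Int).length : Int) = 0 by simp,
      pyRange_pos_nil _ _ _ (by omega) (by omega)]
    simp
  | cons x xs ih =>
    intro i j h0 h1 h2 h3
    simp only [routed]
    set i' := if i = k then 0 else i with hi'def
    have hi' : 0 ≤ i' ∧ i' < k := by rw [hi'def]; split <;> omega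
    have hdd : ∀ a b : Int, distTo k a b = if a ≤ b then b - a else b - a + k :=
      fun a b => rfl
    have hd : 0 ≤ distTo k i' j ∧ distTo k i' j < k := by rw [hdd]; split <;> omega
    rw [colFrom_cons k (distTo k i' j) x xs hk hd.1 hd.2]
    rw [ih (i' + 1) j (by omega) (by omega) h2 h3]
    set i'' := if i' + 1 = k then 0 else i' + 1 with hi''def
    have hi'' : 0 ≤ i'' ∧ i'' < k := by rw [hi''def]; split <;> omega
    by_cases hj : j = i'
    · rw [if_pos hj, if_pos (show distTo k i' j = 0 by rw [hdd]; split <;> omega)]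
      rw [show distTo k i'' j = k - 1 by rw [hdd, hi''def]; split_ifs <;> omega]
      simp
    · rw [if_neg hj, if_neg (show ¬ distTo k i' j = 0 by rw [hdd]; split <;> omega)]
      rw [show distTo k i'' j = distTo k i' j - 1 by
        rw [hdd, hdd, hi''def]; split_ifs <;> omega]
      simp

-- ===== VERDICT (by name: the statement is the Claim_ definition above) =====
theorem transpose_chunks_by_keylength_spec : Claim_equal_transpose_chunks_by_keylength := by
  intro k l _dom hpre
  have hk : (1 : Int) ≤ k := hpre
  unfold Spec_transpose_chunks_by_keylength
  show pvLoop k ((PySem.List.pyRange 0 k 1).map (fun j => (j, (none : Option (List Int))))) 0 l = _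
  rw [show ((PySem.List.pyRange 0 k 1).map (fun j => (j, (none : Option (List Int))))) =
        canonFrom 0 k (fun _ => none) from rfl]
  rw [pvLoop_canonFrom k hk l (fun _ => none) 0 (by omega) (by omega)]
  show _ = (PySem.List.pyRange 0 k 1).map (fun j =>
    (j, if (PySem.List.pyRange j (l.length : Int) k).map (fun m => PySem.List.pyGetD l m 0) = []
        then none
        else some ((PySem.List.pyRange j (l.length : Int) k).map (fun m => PySem.List.pyGetD l m 0))))
  rw [show ((PySem.List.pyRange 0 k 1).map (fun j =>
    (j, if (PySem.List.pyRange j (l.length : Int) k).map (fun m => PySem.List.pyGetD l m 0) = []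
        then none
        else some ((PySem.List.pyRange j (l.length : Int) k).map (fun m => PySem.List.pyGetD l m 0))))) =
    canonFrom 0 k (fun j => if colFrom k j l = [] then none else some (colFrom k j l)) from rfl]
  apply canonFrom_congr
  intro j hj0 hjk
  rw [engine_routed, routed_eq_colFrom k hk l 0 j (by omega) (by omega) hj0 hjk]
  rw [show (if (0 : Int) = k then (0 : Int) else 0) = 0 by simp]
  rw [show distTo k 0 j = j by unfold distTo; split <;> omega]
  by_cases hc : colFrom k j l = [] <;> simp [hc]
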